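-- pv_equiv track=rewrite | github.com/zephyrproject-rtos/zephyr | scripts/logging/dictionary/dictionary_parser/log_parser_v3.py | extract_string_table
-- ===== SOURCE A (Python) =====
-- def extract_string_table(str_tbl):
--     """Extract string table in a packaged log message"""
--     tbl = {}
--
--     one_str = ""
--     next_new_string = True
--     # Translated from cbvprintf_package()
--     for one_ch in str_tbl:
--         if next_new_string:
--             str_idx = one_ch
--             next_new_string = False
--             continue
--
--         if one_ch == 0:
--             tbl[str_idx] = one_str
--             one_str = ""
--             next_new_string = True
--             continue
--
--         one_str += chr(one_ch)
--
--     return tbl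
-- ===== SOURCE B (Python) =====
-- def extract_string_table(str_tbl):
--     """Extract string table in a packaged log message"""
--     tbl = {}
--     n = len(str_tbl)
--     i = 0
--     while i < n:
--         idx = str_tbl[i]
--         end = i + 1
--         while end < n and str_tbl[end] != 0:
--             end += 1
--         if end == n:
--             break  # unterminated trailing record is dropped
--         tbl[idx] = "".join(chr(b) for b in str_tbl[i + 1:end])
--         i = end + 1
--     return tbl
-- ===== Notes on version B (the rewrite author's own statement) =====
-- stated objective: alternative
-- what changed: Replaces the per-byte three-state flag machine with a record-chunking loop: at each record read the index byte, scan forward for the next 0 terminator, build the whole string at once from the slice, and jump past the terminator.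
import Mathlib
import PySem

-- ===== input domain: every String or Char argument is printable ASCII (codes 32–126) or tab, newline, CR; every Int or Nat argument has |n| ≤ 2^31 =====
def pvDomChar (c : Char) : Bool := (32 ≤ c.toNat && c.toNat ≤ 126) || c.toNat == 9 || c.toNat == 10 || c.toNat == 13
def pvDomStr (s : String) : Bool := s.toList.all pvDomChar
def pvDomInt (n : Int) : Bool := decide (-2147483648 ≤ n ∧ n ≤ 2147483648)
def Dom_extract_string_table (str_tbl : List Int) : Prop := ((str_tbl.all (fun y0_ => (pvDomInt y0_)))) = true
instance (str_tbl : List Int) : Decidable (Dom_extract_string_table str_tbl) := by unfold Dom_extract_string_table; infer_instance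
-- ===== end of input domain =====

-- B replaces A's per-byte three-state flag machine by a record-chunking loop (read index byte,
-- scan to the next 0 terminator, emit the whole string at once); same cost, different decomposition.

-- chr(n), exact on Pre_ (0 ≤ n ≤ 0x10FFFF, not a surrogate); used by both ports
def pvChr (n : Int) : Char := Char.ofNat n.toNat

-- ===== PORT A =====
def pvStepA (s : PySem.Dict Int String × String × Int × Bool) (one_ch : Int) :
    PySem.Dict Int String × String × Int × Bool :=
  match s with
  | (tbl, one_str, str_idx, next_new_string) =>
    if next_new_string then (tbl, one_str, one_ch, false)
    else if one_ch = 0 then (tbl.insert str_idx one_str, "", str_idx, true)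
    else (tbl, one_str.push (pvChr one_ch), str_idx, next_new_string)

def extract_string_table (str_tbl : List Int) : List (Int × String) :=
  (str_tbl.foldl pvStepA (PySem.Dict.empty, "", 0, true)).1.items

-- ===== PORT B =====
-- the inner while loop: scan forward for the next 0 byte; some (chars before it, rest after it)
def pvChunk : List Int → Option (List Int × List Int)
  | [] => none
  | c :: t => if c = 0 then some ([], t) else (pvChunk t).map (fun pr => (c :: pr.1, pr.2))

theorem pvChunk_some_length : ∀ {l : List Int} {p r : List Int},
    pvChunk l = some (p, r) → r.length < l.length := by
  intro l
  induction l with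
  | nil => intro p r h; simp [pvChunk] at h
  | cons c t ih =>
    intro p r h
    by_cases hc : c = 0
    · simp [pvChunk, hc] at h
      simp [← h.2]
    · simp only [pvChunk, if_neg hc, Option.map_eq_some_iff] at h
      obtain ⟨⟨p', r'⟩, hm, he⟩ := h
      cases he
      exact Nat.lt_succ_of_lt (ih hm)

-- "".join(chr(b) for b in cs)
def pvStrOf (cs : List Int) : String := String.ofList (cs.map pvChr)

def pvLoopB (tbl : PySem.Dict Int String) : List Int → PySem.Dict Int String
  | [] => tbl
  | idx :: rest =>
    match h : pvChunk rest with
    | none => tbl                     -- unterminated trailing record is dropped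
    | some (p, r) => pvLoopB (tbl.insert idx (pvStrOf p)) r
termination_by l => l.length
decreasing_by exact Nat.lt_succ_of_lt (pvChunk_some_length h)

def extract_string_table_alt (str_tbl : List Int) : List (Int × String) :=
  (pvLoopB PySem.Dict.empty str_tbl).items

-- ===== PRECONDITION & SPEC =====
-- a byte the Pythons pass to chr: valid codepoint, not a UTF-16 surrogate
def pvChrOKb (x : Int) : Bool := decide (0 ≤ x ∧ x ≤ 1114111 ∧ ¬(55296 ≤ x ∧ x ≤ 57343))

-- the bytes Python feeds to chr: everything except index bytes and 0 terminators
-- (flag = true when the next byte is a record's index byte); structural, no parse simulation of the ports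
def pvStringBytes : List Int → Bool → List Int
  | [], _ => []
  | _ :: t, true => pvStringBytes t false
  | c :: t, false => if c = 0 then pvStringBytes t true else c :: pvStringBytes t false

-- Pre_ excludes lists in which some string-position byte (including the unterminated trailing
-- record, which A feeds to chr before discarding) is negative, above 0x10FFFF, or a UTF-16
-- surrogate: Python's chr raises ValueError on the first two kinds, and a lone surrogate is
-- not representable as a Lean Char, so such inputs cannot be ported faithfully.
def Pre_extract_string_table (str_tbl : List Int) : Prop :=
  (pvStringBytes str_tbl true).all pvChrOKb = true

instance (str_tbl : List Int) : Decidable (Pre_extract_string_table str_tbl) := by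
  unfold Pre_extract_string_table; infer_instance

def pvWitness_extract_string_table : List Int := [5, 104, 105, 0, 0, 97, 0, 3, 120]

def Spec_extract_string_table (str_tbl : List Int) (out : List (Int × String)) : Prop :=
  out = extract_string_table_alt str_tbl
instance (str_tbl : List Int) (out : List (Int × String)) : Decidable (Spec_extract_string_table str_tbl out) := by
  unfold Spec_extract_string_table; infer_instance

-- ===== CLAIM (what is proved, stated in full; the proofs are below) =====
def Claim_equal_extract_string_table : Prop := ∀ (str_tbl : List Int), Dom_extract_string_table str_tbl → Pre_extract_string_table str_tbl → Spec_extract_string_table str_tbl (extract_string_table str_tbl)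

-- ===== LEMMAS AND PROOFS =====

theorem pv_push_mk (s : String) (c : Char) (l : List Char) :
    (s.push c) ++ String.ofList l = s ++ String.ofList (c :: l) := by
  apply String.ext
  simp only [String.toList_append, String.toList_push, String.toList_ofList, List.append_assoc,
    List.cons_append, List.nil_append]

-- the middle of A's loop: consuming string bytes until the terminator
theorem pvMid (l : List Int) : ∀ (tbl : PySem.Dict Int String) (j : Int) (acc : String),
    (l.foldl pvStepA (tbl, acc, j, false)).1 =
      (match pvChunk l with
       | none => (tbl, acc, j, false)
       | some (p, r) => r.foldl pvStepA (tbl.insert j (acc ++ pvStrOf p), "", j, true)).1 := by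
  induction l with
  | nil => intro tbl j acc; simp [pvChunk]
  | cons c t ih =>
    intro tbl j acc
    by_cases hc : c = 0
    · simp only [List.foldl_cons, pvStepA, hc, if_neg Bool.false_ne_true, if_true, pvChunk]
      have : acc ++ pvStrOf [] = acc := by
        apply String.ext; simp [pvStrOf]
      rw [this]
    · simp only [List.foldl_cons, pvStepA, if_neg Bool.false_ne_true, if_neg hc]
      rw [ih tbl j (acc.push (pvChr c))]
      simp only [pvChunk, if_neg hc]
      cases hch : pvChunk t with
      | none => simp
      | some pr =>
        obtain ⟨p, r⟩ := pr
        have : acc.push (pvChr c) ++ pvStrOf p = acc ++ pvStrOf (c :: p) := by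
          simpa [pvStrOf] using pv_push_mk acc (pvChr c) (p.map pvChr)
        simp [this]

theorem pvMain : ∀ (n : Nat) (l : List Int), l.length ≤ n → ∀ (tbl : PySem.Dict Int String) (j : Int),
    (l.foldl pvStepA (tbl, "", j, true)).1 = pvLoopB tbl l := by
  intro n
  induction n with
  | zero =>
    intro l hl tbl j
    have : l = [] := List.eq_nil_of_length_eq_zero (Nat.le_zero.mp hl)
    subst this; simp [pvLoopB]
  | succ n ih =>
    intro l hl tbl j
    cases l with
    | nil => simp [pvLoopB]
    | cons idx rest =>
      simp only [List.foldl_cons, pvStepA, if_true]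
      rw [pvMid rest tbl idx ""]
      cases hch : pvChunk rest with
      | none =>
        simp only [pvLoopB]
        split
        · rfl
        · rename_i p r h; rw [h] at hch; cases hch
      | some pr =>
        obtain ⟨p, r⟩ := pr
        have hlen : r.length ≤ n := by
          have := pvChunk_some_length hch
          simp at hl; omega
        have hacc : ("" : String) ++ pvStrOf p = pvStrOf p := by
          apply String.ext; simp
        rw [show (match some (p, r) with
              | none => (tbl, "", idx, false)
              | some (p, r) => List.foldl pvStepA (tbl.insert idx ("" ++ pvStrOf p), "", idx, true) r)
            = List.foldl pvStepA (tbl.insert idx ("" ++ pvStrOf p), "", idx, true) r from rfl]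
        rw [hacc, ih r hlen]
        simp only [pvLoopB]
        split
        · rename_i h; rw [h] at hch; cases hch
        · rename_i p' r' h
          rw [h] at hch
          obtain ⟨e1, e2⟩ := Prod.mk.injEq .. ▸ (Option.some.inj hch)
          rw [e1, e2]

-- ===== VERDICT (by name: the statement is the Claim_ definition above) =====
theorem extract_string_table_spec : Claim_equal_extract_string_table := by
  intro str_tbl _ _
  unfold Spec_extract_string_table extract_string_table extract_string_table_alt
  rw [pvMain str_tbl.length str_tbl le_rfl]
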